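-- pv_equiv track=rewrite | github.com/AbhishekTungala/stackstage-ui | backend/utils/diagram_generator.py | _organize_components_by_cluster
-- ===== SOURCE A (Python) =====
-- from typing import Dict, List, Any, Optional, Tuple
--
-- def _organize_components_by_cluster(components: List[Dict], provider: str) -> Dict[str, List[Dict]]:
--     """Organize components into logical clusters"""
--     clusters = {
--         'Internet': [],
--         'Load Balancer': [],
--         'Compute Layer': [],
--         'Database Layer': [],
--         'Storage Layer': [],
--         'Security Services': [],
--         'Monitoring': []
--     }
--
--     for comp in components:
--         comp_type = comp.get('type', '').lower()
--
--         if any(keyword in comp_type for keyword in ['internet', 'cdn', 'cloudfront']):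
--             clusters['Internet'].append(comp)
--         elif any(keyword in comp_type for keyword in ['lb', 'load_balancer', 'alb', 'nlb']):
--             clusters['Load Balancer'].append(comp)
--         elif any(keyword in comp_type for keyword in ['ec2', 'compute', 'vm', 'ecs', 'lambda', 'fargate']):
--             clusters['Compute Layer'].append(comp)
--         elif any(keyword in comp_type for keyword in ['rds', 'database', 'db', 'sql', 'dynamodb', 'elasticache']):
--             clusters['Database Layer'].append(comp)
--         elif any(keyword in comp_type for keyword in ['s3', 'storage', 'bucket', 'efs', 'ebs']):
--             clusters['Storage Layer'].append(comp)
--         elif any(keyword in comp_type for keyword in ['waf', 'security', 'iam', 'kms', 'guardduty']):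
--             clusters['Security Services'].append(comp)
--         elif any(keyword in comp_type for keyword in ['cloudwatch', 'monitoring', 'logging', 'xray']):
--             clusters['Monitoring'].append(comp)
--         else:
--             clusters['Compute Layer'].append(comp)  # Default cluster
--
--     # Remove empty clusters
--     return {k: v for k, v in clusters.items() if v}
-- ===== SOURCE B (Python) =====
-- _TABLE = [
--     ('Internet', ['internet', 'cdn', 'cloudfront']),
--     ('Load Balancer', ['lb', 'load_balancer', 'alb', 'nlb']),
--     ('Compute Layer', ['ec2', 'compute', 'vm', 'ecs', 'lambda', 'fargate']),
--     ('Database Layer', ['rds', 'database', 'db', 'sql', 'dynamodb', 'elasticache']),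
--     ('Storage Layer', ['s3', 'storage', 'bucket', 'efs', 'ebs']),
--     ('Security Services', ['waf', 'security', 'iam', 'kms', 'guardduty']),
--     ('Monitoring', ['cloudwatch', 'monitoring', 'logging', 'xray']),
-- ]
--
--
-- def _cluster_of(comp):
--     comp_type = comp.get('type', '').lower()
--     for name, keywords in _TABLE:
--         if any(keyword in comp_type for keyword in keywords):
--             return name
--     return 'Compute Layer'
--
--
-- def _organize_components_by_cluster(components, provider):
--     labels = [_cluster_of(comp) for comp in components]
--     return {name: [c for c, l in zip(components, labels) if l == name]
--             for name, _ in _TABLE if name in labels}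
-- ===== Notes on version B (the rewrite author's own statement) =====
-- stated objective: idiomatic
-- what changed: Replaces the seven-way if/elif append-into-dict loop by a data-driven design: an ordered keyword table, a classify-one-component helper (first matching table row, default 'Compute Layer'), and a dict comprehension that groups components per cluster name and keeps only non-empty clusters.
import Mathlib
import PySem

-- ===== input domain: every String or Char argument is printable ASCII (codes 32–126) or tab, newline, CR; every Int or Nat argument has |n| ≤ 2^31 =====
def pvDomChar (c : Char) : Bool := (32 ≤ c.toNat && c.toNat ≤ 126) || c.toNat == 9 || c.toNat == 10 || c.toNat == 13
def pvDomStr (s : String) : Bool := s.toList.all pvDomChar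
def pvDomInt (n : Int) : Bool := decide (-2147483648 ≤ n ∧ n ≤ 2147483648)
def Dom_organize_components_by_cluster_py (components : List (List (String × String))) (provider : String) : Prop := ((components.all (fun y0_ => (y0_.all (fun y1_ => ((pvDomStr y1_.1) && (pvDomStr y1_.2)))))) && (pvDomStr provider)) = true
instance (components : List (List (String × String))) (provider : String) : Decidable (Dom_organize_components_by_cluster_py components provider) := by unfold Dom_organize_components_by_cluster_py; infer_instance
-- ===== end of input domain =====

-- B replaces A's if/elif append-into-dict loop by a keyword table + classify helper + grouping comprehension (idiomatic; same cost).

-- ===== PORT A =====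
-- one loop iteration of A's for-loop (the if/elif chain, appending into the clusters dict)
def orgStepA (d : PySem.Dict String (List (List (String × String)))) (comp : List (String × String)) : PySem.Dict String (List (List (String × String))) :=
  let comp_type := PySem.Str.lower ((PySem.Dict.mk comp).getD "type" "")
  if (["internet", "cdn", "cloudfront"] : List String).any (fun kw => PySem.Str.isIn kw comp_type) then
    d.modify "Internet" [] (· ++ [comp])
  else if (["lb", "load_balancer", "alb", "nlb"] : List String).any (fun kw => PySem.Str.isIn kw comp_type) then
    d.modify "Load Balancer" [] (· ++ [comp])
  else if (["ec2", "compute", "vm", "ecs", "lambda", "fargate"] : List String).any (fun kw => PySem.Str.isIn kw comp_type) then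
    d.modify "Compute Layer" [] (· ++ [comp])
  else if (["rds", "database", "db", "sql", "dynamodb", "elasticache"] : List String).any (fun kw => PySem.Str.isIn kw comp_type) then
    d.modify "Database Layer" [] (· ++ [comp])
  else if (["s3", "storage", "bucket", "efs", "ebs"] : List String).any (fun kw => PySem.Str.isIn kw comp_type) then
    d.modify "Storage Layer" [] (· ++ [comp])
  else if (["waf", "security", "iam", "kms", "guardduty"] : List String).any (fun kw => PySem.Str.isIn kw comp_type) then
    d.modify "Security Services" [] (· ++ [comp])
  else if (["cloudwatch", "monitoring", "logging", "xray"] : List String).any (fun kw => PySem.Str.isIn kw comp_type) then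
    d.modify "Monitoring" [] (· ++ [comp])
  else
    d.modify "Compute Layer" [] (· ++ [comp])

def organize_components_by_cluster_py (components : List (List (String × String))) (provider : String) : List (String × List (List (String × String))) :=
  let clusters : PySem.Dict String (List (List (String × String))) :=
    PySem.Dict.ofList [("Internet", []), ("Load Balancer", []), ("Compute Layer", []),
                       ("Database Layer", []), ("Storage Layer", []), ("Security Services", []), ("Monitoring", [])]
  let clusters := components.foldl orgStepA clusters
  (clusters.items.filter (fun kv => !kv.2.isEmpty))

-- ===== PORT B =====
def pvTable : List (String × List String) :=
  [("Internet", ["internet", "cdn", "cloudfront"]),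
   ("Load Balancer", ["lb", "load_balancer", "alb", "nlb"]),
   ("Compute Layer", ["ec2", "compute", "vm", "ecs", "lambda", "fargate"]),
   ("Database Layer", ["rds", "database", "db", "sql", "dynamodb", "elasticache"]),
   ("Storage Layer", ["s3", "storage", "bucket", "efs", "ebs"]),
   ("Security Services", ["waf", "security", "iam", "kms", "guardduty"]),
   ("Monitoring", ["cloudwatch", "monitoring", "logging", "xray"])]

-- Source B's _cluster_of: first table row whose keywords match, else the default
def clusterOf (comp : List (String × String)) : String :=
  let comp_type := PySem.Str.lower ((PySem.Dict.mk comp).getD "type" "")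
  match pvTable.find? (fun p => p.2.any (fun kw => PySem.Str.isIn kw comp_type)) with
  | some p => p.1
  | none => "Compute Layer"

def organize_components_by_cluster_py_alt (components : List (List (String × String))) (provider : String) : List (String × List (List (String × String))) :=
  let labels := components.map clusterOf
  (pvTable.filter (fun p => labels.contains p.1)).map
    (fun p => (p.1, ((components.zip labels).filter (fun cl => cl.2 == p.1)).map (·.1)))

-- ===== PRECONDITION & SPEC =====
def Spec_organize_components_by_cluster_py (components : List (List (String × String))) (provider : String) (out : List (String × List (List (String × String)))) : Prop := out = organize_components_by_cluster_py_alt components provider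
instance (components : List (List (String × String))) (provider : String) (out : List (String × List (List (String × String)))) : Decidable (Spec_organize_components_by_cluster_py components provider out) := by unfold Spec_organize_components_by_cluster_py; infer_instance

-- ===== CLAIM (what is proved, stated in full; the proofs are below) =====
def Claim_equal_organize_components_by_cluster_py : Prop := ∀ (components : List (List (String × String))) (provider : String), Dom_organize_components_by_cluster_py components provider → Spec_organize_components_by_cluster_py components provider (organize_components_by_cluster_py components provider)

-- ===== LEMMAS AND PROOFS =====

-- A's loop body is exactly "append comp under the cluster chosen by B's classifier"
theorem orgStepA_eq (d : PySem.Dict String (List (List (String × String)))) (comp : List (String × String)) :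
    orgStepA d comp = d.modify (clusterOf comp) [] (· ++ [comp]) := by
  simp only [orgStepA, clusterOf, pvTable, List.find?]
  generalize (List.any ["internet", "cdn", "cloudfront"] fun kw => PySem.Str.isIn kw (PySem.Str.lower (PySem.Dict.getD (PySem.Dict.mk comp) "type" ""))) = c1
  generalize (List.any ["lb", "load_balancer", "alb", "nlb"] fun kw => PySem.Str.isIn kw (PySem.Str.lower (PySem.Dict.getD (PySem.Dict.mk comp) "type" ""))) = c2
  generalize (List.any ["ec2", "compute", "vm", "ecs", "lambda", "fargate"] fun kw => PySem.Str.isIn kw (PySem.Str.lower (PySem.Dict.getD (PySem.Dict.mk comp) "type" ""))) = c3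
  generalize (List.any ["rds", "database", "db", "sql", "dynamodb", "elasticache"] fun kw => PySem.Str.isIn kw (PySem.Str.lower (PySem.Dict.getD (PySem.Dict.mk comp) "type" ""))) = c4
  generalize (List.any ["s3", "storage", "bucket", "efs", "ebs"] fun kw => PySem.Str.isIn kw (PySem.Str.lower (PySem.Dict.getD (PySem.Dict.mk comp) "type" ""))) = c5
  generalize (List.any ["waf", "security", "iam", "kms", "guardduty"] fun kw => PySem.Str.isIn kw (PySem.Str.lower (PySem.Dict.getD (PySem.Dict.mk comp) "type" ""))) = c6
  generalize (List.any ["cloudwatch", "monitoring", "logging", "xray"] fun kw => PySem.Str.isIn kw (PySem.Str.lower (PySem.Dict.getD (PySem.Dict.mk comp) "type" ""))) = c7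
  cases c1 <;> cases c2 <;> cases c3 <;> cases c4 <;> cases c5 <;> cases c6 <;> cases c7 <;> rfl

theorem clusterOf_mem (comp : List (String × String)) : clusterOf comp ∈ pvTable.map Prod.fst := by
  simp only [clusterOf]
  cases h : List.find? (fun p => p.2.any fun kw => PySem.Str.isIn kw (PySem.Str.lower (PySem.Dict.getD (PySem.Dict.mk comp) "type" ""))) pvTable with
  | none => simp only [h]; decide
  | some p =>
    simp only [h]
    exact List.mem_map_of_mem (List.mem_of_find?_eq_some h)

theorem sel_map_pair {α : Type} (l : List α) (f : α → String) (k : String) :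
    ((l.map (fun c => (f c, c))).filter (fun p => p.1 == k)).map Prod.snd
      = l.filter (fun c => f c == k) := by
  induction l with
  | nil => rfl
  | cons a l ih =>
    by_cases h : f a = k <;> simp [List.filter_cons, h, ih]

theorem sel_zip {α : Type} (l : List α) (f : α → String) (k : String) :
    ((l.zip (l.map f)).filter (fun cl => cl.2 == k)).map Prod.fst
      = l.filter (fun c => f c == k) := by
  induction l with
  | nil => rfl
  | cons a l ih =>
    by_cases h : f a = k <;> simp [List.filter_cons, h, ih]

theorem contains_map_eq {α : Type} (l : List α) (f : α → String) (k : String) :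
    (l.map f).contains k = !(l.filter (fun c => f c == k)).isEmpty := by
  induction l with
  | nil => rfl
  | cons a l ih =>
    simp only [List.map_cons, List.contains_cons, List.filter_cons, ih]
    by_cases h : f a = k
    · simp [h]
    · have hk : (k == f a) = false := beq_false_of_ne (fun e => h e.symm)
      have hf : (f a == k) = false := beq_false_of_ne h
      simp [hk, hf]

theorem bridge {β γ : Type} (T : List (String × β)) (sel : String → List γ) (g : String → Bool)
    (hg : ∀ k, g k = !(sel k).isEmpty) :
    (T.map (fun p => (p.1, sel p.1))).filter (fun kv => !kv.2.isEmpty)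
      = (T.filter (fun p => g p.1)).map (fun p => (p.1, sel p.1)) := by
  induction T with
  | nil => rfl
  | cons p T ih =>
    simp only [List.map_cons, List.filter_cons, ih, hg p.1]
    cases hb : (sel p.1).isEmpty <;> simp [hb]

-- ===== VERDICT (by name: the statement is the Claim_ definition above) =====
theorem organize_components_by_cluster_py_spec : Claim_equal_organize_components_by_cluster_py := by
  unfold Claim_equal_organize_components_by_cluster_py
  intro components provider _
  unfold Spec_organize_components_by_cluster_py
  simp only [organize_components_by_cluster_py, organize_components_by_cluster_py_alt]
  set d0 : PySem.Dict String (List (List (String × String))) :=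
    PySem.Dict.ofList [("Internet", []), ("Load Balancer", []), ("Compute Layer", []),
                       ("Database Layer", []), ("Storage Layer", []), ("Security Services", []), ("Monitoring", [])] with hd0def
  have hstep : orgStepA = fun d c => d.modify (clusterOf c) [] (· ++ [c]) :=
    funext fun d => funext fun c => orgStepA_eq d c
  have hfold : components.foldl orgStepA d0
      = (components.map (fun c => (clusterOf c, c))).foldl (fun d p => d.modify p.1 [] (· ++ [p.2])) d0 := by
    rw [hstep, List.foldl_map]
  have hmemkeys : ∀ c ∈ components, clusterOf c ∈ d0.keys := by
    intro c _
    have h := clusterOf_mem c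
    have he : pvTable.map Prod.fst = d0.keys := by decide
    rwa [he] at h
  have hkeys : (components.foldl orgStepA d0).keys = d0.keys := by
    rw [hfold, PySem.Dict.keys_foldl_modify_key]
    rw [PySem.Set.update_eq_append_filter]
    have hfil : (PySem.Set.ofList ((components.map (fun c => (clusterOf c, c))).map Prod.fst)).filter
        (fun y => !(PySem.Set.contains d0.keys y)) = [] := by
      rw [List.filter_eq_nil_iff]
      intro y hy
      have hy' : y ∈ (components.map (fun c => (clusterOf c, c))).map Prod.fst := by
        simpa [PySem.Set.mem_ofList] using hy
      simp only [List.map_map, List.mem_map, Function.comp] at hy'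
      obtain ⟨c, hc, rfl⟩ := hy'
      have := hmemkeys c hc
      simp [PySem.Set.contains_iff, this]
    rw [hfil, List.append_nil]
  have hnd0 : d0.keys.Nodup := by decide
  have hnd : (components.foldl orgStepA d0).keys.Nodup := hkeys ▸ hnd0
  have hd0getD : ∀ k, PySem.Dict.getD d0 k [] = [] := by
    intro k
    cases h : PySem.Dict.get? d0 k with
    | none => simp [PySem.Dict.getD_eq_get?_getD, h]
    | some v =>
      have hm := PySem.Dict.mem_items_of_get?_eq_some (d := d0) h
      have hit : d0.items = [("Internet", []), ("Load Balancer", []), ("Compute Layer", []),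
          ("Database Layer", []), ("Storage Layer", []), ("Security Services", []), ("Monitoring", [])] := by decide
      rw [hit] at hm
      simp [PySem.Dict.getD_eq_get?_getD, h]
      simp only [List.mem_cons, List.not_mem_nil, or_false] at hm
      rcases hm with hm | hm | hm | hm | hm | hm | hm <;> simp_all
  have hgetD : ∀ k, PySem.Dict.getD (components.foldl orgStepA d0) k []
      = components.filter (fun c => clusterOf c == k) := by
    intro k
    rw [hfold, PySem.Dict.getD_foldl_modify_append, hd0getD k, List.nil_append, sel_map_pair]
  have hitems : (components.foldl orgStepA d0).items
      = d0.keys.map (fun k => (k, PySem.Dict.getD (components.foldl orgStepA d0) k [])) :=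
    (PySem.Dict.items_eq_map_keys _ hnd []).trans (by rw [hkeys])
  rw [hitems]
  simp only [hgetD]
  have hk7 : d0.keys = pvTable.map Prod.fst := by decide
  rw [hk7, List.map_map]
  simp only [Function.comp, sel_zip, contains_map_eq]
  exact bridge pvTable (fun k => components.filter (fun c => clusterOf c == k))
    (fun k => !(components.filter (fun c => clusterOf c == k)).isEmpty) (fun _ => rfl)
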